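-- pv_equiv track=rewrite | github.com/ElJeiForeal/MicroMouse | Modules/GenerateMaze.py | fix_directions
-- ===== SOURCE A (Python) =====
-- import copy
--
-- def fix_directions(maze):
--     maze2 = copy.deepcopy(maze)
--
--     directions = {
--         "L": (-1, 0),
--         "R": (1, 0),
--         "U": (0, -1),
--         "D": (0, 1)
--     }
--
--     opposite = {
--         "L": "R",
--         "R": "L",
--         "U": "D",
--         "D": "U"
--     }
--
--     for row in maze2:
--         for col in maze2[row]:
--             for dir_letter, (dx, dy) in directions.items():
--                 row1, col1 = row + dy, col + dx
--                 if row1 in maze2 and col1 in maze2[row1]: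
--                     if opposite[dir_letter] in maze2[row1][col1]:
--                         if dir_letter not in maze2[row][col]:
--                             maze2[row][col].append(dir_letter)
--
--     # Remove "E" from all cells
--     for row in maze2:
--         for col in maze2[row]:
--             if "E" in maze2[row][col]:
--                 maze2[row][col].remove("E")
--     return maze2
-- ===== SOURCE B (Python) =====
-- def fix_directions(maze):
--     # Edge-centric push in two staged passes: every direction letter a cell holds
--     # OFFERS the mirrored letter to the neighbour it points at (collected into an
--     # index keyed by cell coordinates); then each cell is rebuilt from its original
--     # list plus the offers it received, dropping the first "E".
--     delta = {"L": (-1, 0), "R": (1, 0), "U": (0, -1), "D": (0, 1)}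
--     opposite = {"L": "R", "R": "L", "U": "D", "D": "U"}
--
--     # Pass 1: collect offers (data-driven: iterate the letters actually present).
--     offers = {}
--     for r, row in maze.items():
--         for c, cell in row.items():
--             for s in cell:
--                 if s in delta:
--                     dx, dy = delta[s]
--                     nr, nc = r + dy, c + dx
--                     if nr in maze and nc in maze[nr]:
--                         offers.setdefault((nr, nc), set()).add(opposite[s])
--
--     # Pass 2: rebuild every cell from its original value and the offers index.
--     result = {}
--     for r, row in maze.items():
--         new_row = {}
--         for c, cell in row.items():
--             got = offers.get((r, c), set())
--             base = list(cell)
--             if "E" in base: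
--                 base.remove("E")
--             new_row[c] = base + [d for d in "LRUD" if d in got and d not in cell]
--         result[r] = new_row
--     return result
-- ===== Notes on version B (the rewrite author's own statement) =====
-- stated objective: alternative
-- what changed: A deep-copies the maze and, cell by cell, PULLS each of the four directions by probing the neighbour for the mirrored letter, mutating the copy in place, then strips 'E' in a second sweep; B is edge-centric and staged: a first data-driven pass iterates only the letters each cell actually holds and PUSHES the mirrored letter into an offers index keyed by the neighbour's coordinates, then a rebuild pass constructs each output cell from its original list (first 'E' dropped) plus the offers it received in canonical L,R,U,D order.
import Mathlib
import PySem

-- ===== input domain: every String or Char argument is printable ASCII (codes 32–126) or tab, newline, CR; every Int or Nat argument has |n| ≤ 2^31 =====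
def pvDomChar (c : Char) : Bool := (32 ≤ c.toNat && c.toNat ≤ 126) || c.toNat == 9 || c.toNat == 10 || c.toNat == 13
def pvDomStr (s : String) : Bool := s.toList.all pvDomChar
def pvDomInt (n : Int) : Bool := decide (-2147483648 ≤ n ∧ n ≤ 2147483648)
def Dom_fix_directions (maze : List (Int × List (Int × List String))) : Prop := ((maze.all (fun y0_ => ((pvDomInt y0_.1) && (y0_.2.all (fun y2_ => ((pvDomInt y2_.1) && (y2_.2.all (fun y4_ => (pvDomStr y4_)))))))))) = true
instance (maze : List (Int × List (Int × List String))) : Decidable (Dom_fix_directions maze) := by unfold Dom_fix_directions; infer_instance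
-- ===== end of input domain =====

-- B replaces A's cell-by-cell pull (probe all four neighbours of every cell on a
-- mutated deep copy, then strip "E") by an edge-centric two-stage rebuild: a push
-- pass over the letters actually present collects an offers index keyed by the
-- neighbour's coordinates, and a rebuild pass constructs each output cell from its
-- original list plus its offers (objective: alternative decomposition, same cost).

-- ===== PORT A =====
-- shared representation glue: the Python dict[int, dict[int, list[str]]] is the
-- association list; both ports wrap it into PySem.Dict and unwrap at the end.
def pvToD (maze : List (Int × List (Int × List String))) :
    PySem.Dict Int (PySem.Dict Int (List String)) :=
  PySem.Dict.mk (maze.map (fun p => (p.1, PySem.Dict.mk p.2)))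

def pvFromD (d : PySem.Dict Int (PySem.Dict Int (List String))) :
    List (Int × List (Int × List String)) :=
  d.items.map (fun p => (p.1, p.2.items))

-- directions = {"L": (-1,0), "R": (1,0), "U": (0,-1), "D": (0,1)}  (items order)
def pvDirs : List (String × Int × Int) := [("L", -1, 0), ("R", 1, 0), ("U", 0, -1), ("D", 0, 1)]

-- opposite[d]
def pvOpp (d : String) : String :=
  (PySem.Dict.mk [("L", "R"), ("R", "L"), ("U", "D"), ("D", "U")]).getD d ""

-- body of A's innermost loop: one direction letter at cell (row, col)
def pvDStep (mz : PySem.Dict Int (PySem.Dict Int (List String))) (row col : Int)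
    (d : String × Int × Int) : PySem.Dict Int (PySem.Dict Int (List String)) :=
  let row1 := row + d.2.2
  let col1 := col + d.2.1
  match mz.get? row1 with
  | none => mz
  | some r1 =>
    match r1.get? col1 with
    | none => mz
    | some cell1 =>
      if pvOpp d.1 ∈ cell1 then
        if d.1 ∈ (mz.getD row PySem.Dict.empty).getD col [] then mz
        else mz.modify row PySem.Dict.empty (fun r => r.modify col [] (fun c => c ++ [d.1]))
      else mz

def pvCStep (mz : PySem.Dict Int (PySem.Dict Int (List String))) (row col : Int) :
    PySem.Dict Int (PySem.Dict Int (List String)) :=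
  pvDirs.foldl (fun mz d => pvDStep mz row col d) mz

-- first nested loop of A (the symmetric closure, mutating in place)
def pvPass1 (mz0 : PySem.Dict Int (PySem.Dict Int (List String))) :
    PySem.Dict Int (PySem.Dict Int (List String)) :=
  mz0.keys.foldl (fun mz row =>
    ((mz.getD row PySem.Dict.empty).keys).foldl (fun mz col => pvCStep mz row col) mz) mz0

-- second nested loop of A (remove the first "E" from every cell that has one)
def pvPass2 (mz0 : PySem.Dict Int (PySem.Dict Int (List String))) :
    PySem.Dict Int (PySem.Dict Int (List String)) :=
  mz0.keys.foldl (fun mz row =>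
    ((mz.getD row PySem.Dict.empty).keys).foldl (fun mz col =>
      mz.modify row PySem.Dict.empty (fun r => r.modify col []
        (fun c => if "E" ∈ c then (PySem.List.remove? c "E").getD c else c))) mz) mz0

def fix_directions (maze : List (Int × List (Int × List String))) :
    List (Int × List (Int × List String)) :=
  pvFromD (pvPass2 (pvPass1 (pvToD maze)))

-- ===== PORT B =====
-- delta = {"L": (-1,0), "R": (1,0), "U": (0,-1), "D": (0,1)}
def pvDelta : PySem.Dict String (Int × Int) :=
  PySem.Dict.mk [("L", (-1, 0)), ("R", (1, 0)), ("U", (0, -1)), ("D", (0, 1))]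

-- order = "LRUD"
def pvOrder : List String := ["L", "R", "U", "D"]

-- pass-1 body for ONE letter s held by cell (r, c): push opposite[s] to the
-- neighbour s points at, if that neighbour exists
-- (Python's offers.setdefault(key, set()).add(x) is Dict.modify key ∅ (·.add x))
def pvPushStep (O : PySem.Dict Int (PySem.Dict Int (List String))) (r c : Int)
    (P : PySem.Dict (Int × Int) (PySem.Set String)) (s : String) :
    PySem.Dict (Int × Int) (PySem.Set String) :=
  match pvDelta.get? s with
  | none => P
  | some dxy =>
    let nr := r + dxy.2
    let nc := c + dxy.1
    match O.get? nr with
    | none => P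
    | some nbRow =>
      if nbRow.contains nc then
        P.modify (nr, nc) PySem.Set.empty (fun st => st.add (pvOpp s))
      else P

-- pass 1: the offers index
def pvOffers (O : PySem.Dict Int (PySem.Dict Int (List String))) :
    PySem.Dict (Int × Int) (PySem.Set String) :=
  O.items.foldl (fun P p =>
    p.2.items.foldl (fun P q =>
      q.2.foldl (fun P s => pvPushStep O p.1 q.1 P s) P) P) PySem.Dict.empty

-- pass 2: rebuild one cell from its original value and its offers
def pvRebuildCell (P : PySem.Dict (Int × Int) (PySem.Set String)) (r c : Int)
    (cell : List String) : List String :=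
  let got := P.getD (r, c) PySem.Set.empty
  let base := if "E" ∈ cell then (PySem.List.remove? cell "E").getD cell else cell
  base ++ pvOrder.filter (fun d => PySem.Set.contains got d && decide (d ∉ cell))

def fix_directions_alt (maze : List (Int × List (Int × List String))) :
    List (Int × List (Int × List String)) :=
  let O := pvToD maze
  let P := pvOffers O
  let result := O.items.foldl (fun res p =>
    res.insert p.1 (p.2.items.foldl (fun nr q =>
      nr.insert q.1 (pvRebuildCell P p.1 q.1 q.2)) PySem.Dict.empty)) PySem.Dict.empty
  pvFromD result

-- ===== PRECONDITION & SPEC =====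
-- Pre_ excludes association lists with duplicate row keys or duplicate column
-- keys inside a row: a Python dict cannot have duplicate keys, so such lists do
-- not represent any input the Python programs receive, and the ports' behaviour
-- on them is an artefact of the association-list encoding.
def Pre_fix_directions (maze : List (Int × List (Int × List String))) : Prop :=
  (maze.map Prod.fst).Nodup ∧ ∀ p ∈ maze, (p.2.map Prod.fst).Nodup
instance (maze : List (Int × List (Int × List String))) : Decidable (Pre_fix_directions maze) := by
  unfold Pre_fix_directions; infer_instance

def pvWitness_fix_directions : (List (Int × List (Int × List String))) :=
  [(0, [(0, ["D", "E"]), (1, [])]), (1, [(0, ["U"]), (1, ["L"])])]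

def Spec_fix_directions (maze : List (Int × List (Int × List String))) (out : List (Int × List (Int × List String))) : Prop := out = fix_directions_alt maze
instance (maze : List (Int × List (Int × List String))) (out : List (Int × List (Int × List String))) : Decidable (Spec_fix_directions maze out) := by unfold Spec_fix_directions; infer_instance

-- ===== CLAIM (what is proved, stated in full; the proofs are below) =====
def Claim_equal_fix_directions : Prop := ∀ (maze : List (Int × List (Int × List String))), Dom_fix_directions maze → Pre_fix_directions maze → Spec_fix_directions maze (fix_directions maze)

-- ===== LEMMAS AND PROOFS =====

lemma pvFindMapKey {β γ : Type} (l : List (Int × β)) (g : Int → β → γ) (k : Int) :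
    List.find? (fun p => p.1 == k) (l.map (fun p => (p.1, g p.1 p.2)))
      = (List.find? (fun p => p.1 == k) l).map (fun p => (p.1, g p.1 p.2)) := by
  induction l with
  | nil => simp
  | cons a l ih =>
    by_cases h : a.1 = k <;> simp [List.find?_cons, beq_iff_eq, h, ih]

lemma pvGetMkMap {β γ : Type} (l : List (Int × β)) (g : Int → β → γ) (k : Int) :
    (PySem.Dict.mk (l.map (fun p => (p.1, g p.1 p.2)))).get? k
      = ((PySem.Dict.mk l).get? k).map (g k) := by
  simp only [PySem.Dict.get?, pvFindMapKey]
  rcases h : List.find? (fun p => p.1 == k) l with _ | p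
  · simp [h]
  · have := List.find?_some h
    simp only [beq_iff_eq] at this
    simp [h, this]

lemma pvKeyUnique {β : Type} (l : List (Int × β)) (hnd : (l.map Prod.fst).Nodup)
    {p q : Int × β} (hp : p ∈ l) (hq : q ∈ l) (hk : p.1 = q.1) : p = q := by
  induction l with
  | nil => simp at hp
  | cons a l ih =>
    simp only [List.map_cons, List.nodup_cons] at hnd
    rcases List.mem_cons.1 hp with rfl | hp' <;> rcases List.mem_cons.1 hq with rfl | hq'
    · rfl
    · have hm : (p.1, q.2) ∈ l := by rw [hk]; simpa using hq'
      have hn : ∀ x, (p.1, x) ∉ l := by simpa using hnd.1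
      exact absurd hm (hn q.2)
    · have hm : (q.1, p.2) ∈ l := by rw [← hk]; simpa using hp'
      have hn : ∀ x, (q.1, x) ∉ l := by simpa using hnd.1
      exact absurd hm (hn p.2)
    · exact ih hnd.2 hp' hq'

lemma pvModifyMkMap {β γ : Type} (l : List (Int × β)) (g : Int → β → γ) (k : Int)
    (dflt : γ) (h : γ → γ) (hk : k ∈ l.map Prod.fst) (hnd : (l.map Prod.fst).Nodup) :
    (PySem.Dict.mk (l.map (fun p => (p.1, g p.1 p.2)))).modify k dflt h
      = PySem.Dict.mk (l.map (fun p => (p.1, if p.1 = k then h (g p.1 p.2) else g p.1 p.2))) := by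
  obtain ⟨p₀, hp₀mem, hp₀k⟩ : ∃ p₀ ∈ l, p₀.1 = k := by
    simpa using hk
  have hfind : (PySem.Dict.mk l).get? k = some p₀.2 := by
    apply PySem.Dict.get?_of_mem_items
    · rw [← hp₀k]; exact hp₀mem
    · simpa [PySem.Dict.keys] using hnd
  have hcont : (PySem.Dict.mk (l.map (fun p => (p.1, g p.1 p.2)))).contains k = true := by
    rw [PySem.Dict.contains_eq_isSome_get?, pvGetMkMap, hfind]; rfl
  rw [PySem.Dict.modify, PySem.Dict.getD_eq_get?_getD, pvGetMkMap, hfind]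
  rw [PySem.Dict.insert]
  simp only [hcont, if_true]
  congr 1
  rw [List.map_map]
  apply List.map_congr_left
  intro p hp
  by_cases hpk : p.1 = k
  · have : p = p₀ := pvKeyUnique l hnd hp hp₀mem (by rw [hpk, hp₀k])
    subst this
    simp [hpk, hp₀k]
  · simp [hpk]

def mapCells (O : PySem.Dict Int (PySem.Dict Int (List String)))
    (f : Int → Int → List String → List String) : PySem.Dict Int (PySem.Dict Int (List String)) :=
  PySem.Dict.mk (O.items.map (fun p =>
    (p.1, PySem.Dict.mk (p.2.items.map (fun q => (q.1, f p.1 q.1 q.2))))))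

lemma mapCells_keys (O : PySem.Dict Int (PySem.Dict Int (List String)))
    (f : Int → Int → List String → List String) : (mapCells O f).keys = O.keys := by
  simp [mapCells, PySem.Dict.keys, List.map_map]

lemma mapCells_get? (O : PySem.Dict Int (PySem.Dict Int (List String)))
    (f : Int → Int → List String → List String) (r : Int) :
    (mapCells O f).get? r
      = (O.get? r).map (fun rd => PySem.Dict.mk (rd.items.map (fun q => (q.1, f r q.1 q.2)))) := by
  exact pvGetMkMap O.items (fun r rd => PySem.Dict.mk (rd.items.map (fun q => (q.1, f r q.1 q.2)))) r

lemma mapCells_congr (O : PySem.Dict Int (PySem.Dict Int (List String)))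
    (f f' : Int → Int → List String → List String)
    (h : ∀ p ∈ O.items, ∀ q ∈ p.2.items, f p.1 q.1 q.2 = f' p.1 q.1 q.2) :
    mapCells O f = mapCells O f' := by
  unfold mapCells
  congr 1
  apply List.map_congr_left
  intro p hp
  congr 1
  congr 1
  apply List.map_congr_left
  intro q hq
  simp [h p hp q hq]

lemma mapCells_id (O : PySem.Dict Int (PySem.Dict Int (List String))) :
    mapCells O (fun _ _ v => v) = O := by
  simp [mapCells]

lemma mapCells_mapCells (O : PySem.Dict Int (PySem.Dict Int (List String)))
    (f g : Int → Int → List String → List String) :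
    mapCells (mapCells O f) g = mapCells O (fun r c v => g r c (f r c v)) := by
  simp [mapCells, List.map_map, Function.comp_def]

lemma mapCells_modify2 (O : PySem.Dict Int (PySem.Dict Int (List String)))
    (f : Int → Int → List String → List String) (row col : Int)
    (rowd : PySem.Dict Int (List String)) (hrow : O.get? row = some rowd)
    (hcol : col ∈ rowd.keys) (hnd1 : O.keys.Nodup)
    (hnd2 : ∀ p ∈ O.items, p.2.keys.Nodup) (h : List String → List String) :
    (mapCells O f).modify row PySem.Dict.empty (fun rd => rd.modify col [] h)
      = mapCells O (fun r c v => if r = row ∧ c = col then h (f r c v) else f r c v) := by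
  have hmem : (row, rowd) ∈ O.items := PySem.Dict.mem_items_of_get?_eq_some O hrow
  have hkrow : row ∈ O.items.map Prod.fst := by
    simpa [PySem.Dict.keys] using List.mem_map_of_mem (f := Prod.fst) hmem
  have hnd1' : (O.items.map Prod.fst).Nodup := by simpa [PySem.Dict.keys] using hnd1
  rw [show (mapCells O f) = PySem.Dict.mk (O.items.map (fun p =>
      (p.1, PySem.Dict.mk (p.2.items.map (fun q => (q.1, f p.1 q.1 q.2)))))) from rfl]
  rw [pvModifyMkMap O.items
      (fun r rd => PySem.Dict.mk (rd.items.map (fun q => (q.1, f r q.1 q.2))))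
      row PySem.Dict.empty (fun rd => rd.modify col [] h) hkrow hnd1']
  unfold mapCells
  congr 1
  apply List.map_congr_left
  intro p hp
  by_cases hpr : p.1 = row
  · have hpe : p = (row, rowd) := pvKeyUnique O.items hnd1' hp hmem (by simpa using hpr)
    subst hpe
    rw [pvModifyMkMap rowd.items (fun c v => f row c v) col [] h
        (by simpa [PySem.Dict.keys] using hcol)
        (by simpa [PySem.Dict.keys] using hnd2 _ hmem)]
    simp only [if_true, true_and]
  · simp only [if_neg hpr]
    congr 1
    congr 1
    apply List.map_congr_left
    intro q hq
    simp [hpr]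

def cellO? (O : PySem.Dict Int (PySem.Dict Int (List String))) (r c : Int) : Option (List String) :=
  (O.get? r).bind (fun rd => rd.get? c)

def cellO (O : PySem.Dict Int (PySem.Dict Int (List String))) (r c : Int) : List String :=
  (cellO? O r c).getD []

def qualB (O : PySem.Dict Int (PySem.Dict Int (List String))) (r c : Int)
    (d : String × Int × Int) : Bool :=
  decide (d.1 ∉ cellO O r c) && (cellO? O (r + d.2.2) (c + d.2.1)).isSome
    && decide (pvOpp d.1 ∈ cellO O (r + d.2.2) (c + d.2.1))

def addB (O : PySem.Dict Int (PySem.Dict Int (List String))) (r c : Int) : List String :=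
  (pvDirs.filter (fun d => qualB O r c d)).map Prod.fst

def SoundE (O : PySem.Dict Int (PySem.Dict Int (List String))) (ext : Int → Int → List String) : Prop :=
  ∀ r c s, s ∈ ext r c → ∃ d ∈ pvDirs, d.1 = s ∧ qualB O r c d = true

lemma pvDirsOpp : ∀ d ∈ pvDirs, ∀ d' ∈ pvDirs, d'.1 = pvOpp d.1 →
    d'.2.1 = -d.2.1 ∧ d'.2.2 = -d.2.2 ∧ pvOpp d'.1 = d.1 := by decide

lemma pvNbr (O : PySem.Dict Int (PySem.Dict Int (List String))) (ext : Int → Int → List String)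
    (hs : SoundE O ext) (r c : Int) (d : String × Int × Int) (hd : d ∈ pvDirs)
    (hmem : pvOpp d.1 ∈ ext (r + d.2.2) (c + d.2.1)) : d.1 ∈ cellO O r c := by
  obtain ⟨d', hd', hfst, hq⟩ := hs _ _ _ hmem
  obtain ⟨e1, e2, e3⟩ := pvDirsOpp d hd d' hd' hfst
  simp only [qualB, Bool.and_eq_true, decide_eq_true_eq] at hq
  have h3 := hq.2
  rw [e3, e1, e2] at h3
  simpa using h3

lemma cellO_eq (O : PySem.Dict Int (PySem.Dict Int (List String))) {row col : Int}
    {rowd : PySem.Dict Int (List String)} {cv : List String}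
    (hrow : O.get? row = some rowd) (hcv : rowd.get? col = some cv) :
    cellO O row col = cv := by simp [cellO, cellO?, hrow, hcv]

lemma dstep_eq (O : PySem.Dict Int (PySem.Dict Int (List String)))
    (ext : Int → Int → List String) (hs : SoundE O ext)
    (hnd1 : O.keys.Nodup) (hnd2 : ∀ p ∈ O.items, p.2.keys.Nodup)
    (row col : Int) (rowd : PySem.Dict Int (List String)) (cv : List String)
    (hrow : O.get? row = some rowd) (hcv : rowd.get? col = some cv)
    (d : String × Int × Int) (hd : d ∈ pvDirs) (hdx : d.1 ∉ ext row col) :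
    pvDStep (mapCells O (fun r c v => v ++ ext r c)) row col d
      = mapCells O (fun r c v =>
          v ++ (if r = row ∧ c = col then
                  ext row col ++ (if qualB O row col d then [d.1] else [])
                else ext r c)) := by
  have hcell : cellO O row col = cv := cellO_eq O hrow hcv
  have htriv : qualB O row col d = false →
      mapCells O (fun r c v => v ++ ext r c)
        = mapCells O (fun r c v =>
            v ++ (if r = row ∧ c = col then
                    ext row col ++ (if qualB O row col d then [d.1] else [])
                  else ext r c)) := by
    intro hq
    apply mapCells_congr
    intro p hp q hq'
    by_cases h : p.1 = row ∧ q.1 = col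
    · simp [h, hq]
    · simp [h]
  unfold pvDStep
  dsimp only
  rw [mapCells_get?]
  rcases h1 : O.get? (row + d.2.2) with _ | rd1
  · simp only [Option.map_none]
    apply htriv
    simp [qualB, cellO?, h1]
  · simp only [Option.map_some]
    rw [pvGetMkMap rd1.items (fun c v => v ++ ext (row + d.2.2) c) (col + d.2.1)]
    rcases h2 : rd1.get? (col + d.2.1) with _ | nbv
    · simp only [Option.map_none]
      apply htriv
      simp [qualB, cellO?, h1, h2]
    · simp only [Option.map_some]
      have hnb : cellO O (row + d.2.2) (col + d.2.1) = nbv := cellO_eq O h1 h2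
      have hself : ((mapCells O (fun r c v => v ++ ext r c)).getD row PySem.Dict.empty).getD col []
          = cv ++ ext row col := by
        have hrowval : (mapCells O (fun r c v => v ++ ext r c)).getD row PySem.Dict.empty
            = PySem.Dict.mk (rowd.items.map (fun q => (q.1, q.2 ++ ext row q.1))) := by
          rw [PySem.Dict.getD_eq_get?_getD, mapCells_get?, hrow]; rfl
        rw [hrowval, PySem.Dict.getD_eq_get?_getD,
          pvGetMkMap rowd.items (fun c v => v ++ ext row c) col, hcv]
        rfl
      by_cases hm : pvOpp d.1 ∈ nbv ++ ext (row + d.2.2) (col + d.2.1)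
      · rw [if_pos hm]
        rw [hself]
        rcases List.mem_append.1 hm with hm1 | hm2
        · -- opposite letter is in the ORIGINAL neighbour cell
          by_cases hcvd : d.1 ∈ cv
          · rw [if_pos (List.mem_append_left _ hcvd)]
            apply htriv
            simp [qualB, hcell, hcvd]
          · have hnotin : d.1 ∉ cv ++ ext row col := by
              simp [hcvd, hdx]
            rw [if_neg hnotin]
            have hqt : qualB O row col d = true := by
              simp [qualB, hcell, hcvd, cellO?, h1, h2, hnb, hm1]
            rw [mapCells_modify2 O _ row col rowd hrow
                (by simpa [PySem.Dict.keys] using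
                  List.mem_map_of_mem (f := Prod.fst) (PySem.Dict.mem_items_of_get?_eq_some rowd hcv))
                hnd1 hnd2 (fun c => c ++ [d.1])]
            apply mapCells_congr
            intro p hp q hq'
            by_cases h : p.1 = row ∧ q.1 = col
            · simp [h, hqt, List.append_assoc]
            · simp [h]
        · -- opposite letter only appended to the neighbour: then d.1 ∈ cv already
          have hmem : d.1 ∈ cellO O row col := pvNbr O ext hs row col d hd hm2
          rw [hcell] at hmem
          rw [if_pos (List.mem_append_left _ hmem)]
          apply htriv
          simp [qualB, hcell, hmem]
      · rw [if_neg hm]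
        apply htriv
        have : pvOpp d.1 ∉ nbv := fun hc => hm (List.mem_append_left _ hc)
        simp [qualB, hnb, this, cellO?, h1, h2]

lemma sound_step (O : PySem.Dict Int (PySem.Dict Int (List String)))
    (ext : Int → Int → List String) (hs : SoundE O ext) (row col : Int)
    (d : String × Int × Int) (hd : d ∈ pvDirs) :
    SoundE O (fun r c => if r = row ∧ c = col then
        ext row col ++ (if qualB O row col d then [d.1] else []) else ext r c) := by
  intro r c s hsm
  dsimp only at hsm
  by_cases hrc : r = row ∧ c = col
  · obtain ⟨rfl, rfl⟩ := hrc
    rw [if_pos (And.intro rfl rfl), List.mem_append] at hsm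
    rcases hsm with h | h
    · exact hs r c s h
    · by_cases hq : qualB O r c d = true
      · simp only [hq, if_true, List.mem_singleton] at h
        exact ⟨d, hd, h.symm, hq⟩
      · simp [hq] at h
  · rw [if_neg hrc] at hsm
    exact hs r c s hsm

lemma dlist_eq (O : PySem.Dict Int (PySem.Dict Int (List String)))
    (hnd1 : O.keys.Nodup) (hnd2 : ∀ p ∈ O.items, p.2.keys.Nodup)
    (row col : Int) (rowd : PySem.Dict Int (List String)) (cv : List String)
    (hrow : O.get? row = some rowd) (hcv : rowd.get? col = some cv) :
    ∀ (ds : List (String × Int × Int)) (ext : Int → Int → List String),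
      SoundE O ext → (∀ d ∈ ds, d ∈ pvDirs) → (∀ d ∈ ds, d.1 ∉ ext row col) →
      (ds.map Prod.fst).Nodup →
      ds.foldl (fun mz d => pvDStep mz row col d) (mapCells O (fun r c v => v ++ ext r c))
        = mapCells O (fun r c v => v ++ (if r = row ∧ c = col then
            ext row col ++ ((ds.filter (fun d => qualB O row col d)).map Prod.fst)
          else ext r c)) := by
  intro ds
  induction ds with
  | nil =>
    intro ext hs hsub hni hndl
    simp only [List.foldl_nil, List.filter_nil, List.map_nil, List.append_nil]
    apply mapCells_congr
    intro p hp q hq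
    by_cases h : p.1 = row ∧ q.1 = col
    · simp [h.1, h.2]
    · simp [h]
  | cons d ds ih =>
    intro ext hs hsub hni hndl
    rw [List.foldl_cons,
      dstep_eq O ext hs hnd1 hnd2 row col rowd cv hrow hcv d (hsub d (by simp))
        (hni d (by simp))]
    have hletters : ∀ d' ∈ ds, d'.1 ∉ (fun r c => if r = row ∧ c = col then
        ext row col ++ (if qualB O row col d then [d.1] else []) else ext r c) row col := by
      intro d' hd'
      dsimp only
      rw [if_pos (And.intro rfl rfl), List.mem_append]
      rintro (h | h)
      · exact hni d' (by simp [hd']) h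
      · have hne : d'.1 ≠ d.1 := by
          simp only [List.map_cons, List.nodup_cons] at hndl
          intro he
          exact hndl.1 (he ▸ List.mem_map_of_mem hd')
        by_cases hq : qualB O row col d = true <;> simp [hq] at h
        exact hne h
    have ih' := ih (fun r c => if r = row ∧ c = col then
        ext row col ++ (if qualB O row col d then [d.1] else []) else ext r c)
      (sound_step O ext hs row col d (hsub d (by simp)))
      (fun d' hd' => hsub d' (by simp [hd']))
      hletters
      (by simpa using (by simp only [List.map_cons, List.nodup_cons] at hndl; exact hndl.2))
    refine Eq.trans ih' ?_
    apply mapCells_congr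
    intro p hp q hq
    by_cases h : p.1 = row ∧ q.1 = col
    · obtain ⟨h1, h2⟩ := h
      rw [h1, h2]
      by_cases hq' : qualB O row col d = true <;>
        simp [hq', List.filter_cons, List.append_assoc]
    · simp [h]

lemma mem_keys_get? (d : PySem.Dict Int (PySem.Dict Int (List String))) {k : Int}
    (h : k ∈ d.keys) : ∃ v, d.get? k = some v := by
  rcases he : d.get? k with _ | v
  · exact absurd ((PySem.Dict.get?_eq_none_iff_not_mem_keys _ _).1 he) (by simp [h])
  · exact ⟨v, rfl⟩

lemma mem_keys_get?' (rowd : PySem.Dict Int (List String)) {k : Int}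
    (h : k ∈ rowd.keys) : ∃ v, rowd.get? k = some v := by
  rcases he : rowd.get? k with _ | v
  · exact absurd ((PySem.Dict.get?_eq_none_iff_not_mem_keys _ _).1 he) (by simp [h])
  · exact ⟨v, rfl⟩

lemma sound_cell (O : PySem.Dict Int (PySem.Dict Int (List String)))
    (ext : Int → Int → List String) (hs : SoundE O ext) (row col : Int) :
    SoundE O (fun r c => if r = row ∧ c = col then
        ext row col ++ addB O row col else ext r c) := by
  intro r c s hsm
  dsimp only at hsm
  by_cases hrc : r = row ∧ c = col
  · obtain ⟨rfl, rfl⟩ := hrc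
    rw [if_pos (And.intro rfl rfl), List.mem_append] at hsm
    rcases hsm with h | h
    · exact hs r c s h
    · simp only [addB, List.mem_map, List.mem_filter] at h
      obtain ⟨d, ⟨hd, hq⟩, hfst⟩ := h
      exact ⟨d, hd, hfst, hq⟩
  · rw [if_neg hrc] at hsm
    exact hs r c s hsm

lemma fold_cols_cstep (O : PySem.Dict Int (PySem.Dict Int (List String)))
    (hnd1 : O.keys.Nodup) (hnd2 : ∀ p ∈ O.items, p.2.keys.Nodup)
    (row : Int) (rowd : PySem.Dict Int (List String)) (hrow : O.get? row = some rowd) :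
    ∀ (cols : List Int) (ext : Int → Int → List String),
      SoundE O ext → cols.Nodup → (∀ c ∈ cols, c ∈ rowd.keys) →
      (∀ c ∈ cols, ext row c = []) →
      cols.foldl (fun mz col => pvCStep mz row col) (mapCells O (fun r c v => v ++ ext r c))
        = mapCells O (fun r c v => v ++ (if r = row ∧ c ∈ cols then addB O r c else ext r c)) := by
  intro cols
  induction cols with
  | nil =>
    intro ext hs hndc hsub hemp
    simp only [List.foldl_nil]
    apply mapCells_congr
    intro p hp q hq
    simp
  | cons col cols ih =>
    intro ext hs hndc hsub hemp
    obtain ⟨cv, hcv⟩ := mem_keys_get?' rowd (hsub col (by simp))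
    have e1 : pvCStep (mapCells O (fun r c v => v ++ ext r c)) row col
        = mapCells O (fun r c v => v ++ (if r = row ∧ c = col then
            ext row col ++ addB O row col else ext r c)) :=
      dlist_eq O hnd1 hnd2 row col rowd cv hrow hcv pvDirs ext hs
        (fun d hd => hd) (fun d _ => by rw [hemp col (by simp)]; simp)
        (by decide)
    rw [List.foldl_cons, e1]
    have ih' := ih (fun r c => if r = row ∧ c = col then
        ext row col ++ addB O row col else ext r c)
      (sound_cell O ext hs row col)
      (by simpa using (List.nodup_cons.1 hndc).2)
      (fun c hc => hsub c (by simp [hc]))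
      (fun c hc => by
        have hne : ¬(row = row ∧ c = col) := by
          rintro ⟨-, rfl⟩
          exact (List.nodup_cons.1 hndc).1 hc
        dsimp only
        rw [if_neg hne]
        exact hemp c (by simp [hc]))
    refine Eq.trans ih' ?_
    apply mapCells_congr
    intro p hp q hq
    by_cases h1 : p.1 = row ∧ q.1 = col
    · obtain ⟨e1, e2⟩ := h1
      have hnc : q.1 ∉ cols := e2 ▸ (List.nodup_cons.1 hndc).1
      rw [e1, e2]
      simp [hemp col (by simp), (List.nodup_cons.1 hndc).1]
    · by_cases h2 : p.1 = row ∧ q.1 ∈ cols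
      · simp [h2, h2.1, h2.2, h1]
      · have h3 : ¬(p.1 = row ∧ q.1 ∈ col :: cols) := by
          rintro ⟨hr, hcmem⟩
          rcases List.mem_cons.1 hcmem with hc | hc
          · exact h1 ⟨hr, hc⟩
          · exact h2 ⟨hr, hc⟩
        simp only [if_neg h1, if_neg h2, if_neg h3]

lemma keys_getD_mapCells (O : PySem.Dict Int (PySem.Dict Int (List String)))
    (f : Int → Int → List String → List String) {row : Int}
    {rowd : PySem.Dict Int (List String)} (hrow : O.get? row = some rowd) :
    ((mapCells O f).getD row PySem.Dict.empty).keys = rowd.keys := by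
  rw [PySem.Dict.getD_eq_get?_getD, mapCells_get?, hrow]
  simp [PySem.Dict.keys, List.map_map]

lemma fold_rows_cstep (O : PySem.Dict Int (PySem.Dict Int (List String)))
    (hnd1 : O.keys.Nodup) (hnd2 : ∀ p ∈ O.items, p.2.keys.Nodup) :
    ∀ (rows : List Int) (ext : Int → Int → List String),
      SoundE O ext → rows.Nodup → (∀ r ∈ rows, r ∈ O.keys) →
      (∀ r ∈ rows, ∀ c, ext r c = []) →
      rows.foldl (fun mz row =>
          ((mz.getD row PySem.Dict.empty).keys).foldl (fun mz col => pvCStep mz row col) mz)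
        (mapCells O (fun r c v => v ++ ext r c))
        = mapCells O (fun r c v => v ++ (if r ∈ rows then addB O r c else ext r c)) := by
  intro rows
  induction rows with
  | nil =>
    intro ext hs hndr hsub hemp
    simp only [List.foldl_nil]
    apply mapCells_congr
    intro p hp q hq
    simp
  | cons row rows ih =>
    intro ext hs hndr hsub hemp
    obtain ⟨rowd, hrow⟩ := mem_keys_get? O (hsub row (by simp))
    have hmem : (row, rowd) ∈ O.items := PySem.Dict.mem_items_of_get?_eq_some O hrow
    have hkeys := keys_getD_mapCells O (fun r c v => v ++ ext r c) hrow
    rw [List.foldl_cons, hkeys]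
    rw [fold_cols_cstep O hnd1 hnd2 row rowd hrow rowd.keys ext hs
      (hnd2 _ hmem) (fun c hc => hc) (fun c _ => hemp row (by simp) c)]
    have ih' := ih (fun r c => if r = row ∧ c ∈ rowd.keys then addB O r c else ext r c)
      (by
        intro r c s hsm
        dsimp only at hsm
        by_cases hrc : r = row ∧ c ∈ rowd.keys
        · rw [if_pos hrc] at hsm
          simp only [addB, List.mem_map, List.mem_filter] at hsm
          obtain ⟨d, ⟨hd, hq⟩, hfst⟩ := hsm
          exact ⟨d, hd, hfst, hq⟩
        · rw [if_neg hrc] at hsm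
          exact hs r c s hsm)
      (by simpa using (List.nodup_cons.1 hndr).2)
      (fun r hr => hsub r (by simp [hr]))
      (fun r hr c => by
        have hne : ¬(r = row ∧ c ∈ rowd.keys) := by
          rintro ⟨rfl, -⟩
          exact (List.nodup_cons.1 hndr).1 hr
        dsimp only
        rw [if_neg hne]
        exact hemp r (by simp [hr]) c)
    refine Eq.trans ih' ?_
    apply mapCells_congr
    intro p hp q hq
    by_cases h1 : p.1 = row
    · have hpe : p = (row, rowd) :=
        pvKeyUnique O.items (by simpa [PySem.Dict.keys] using hnd1) hp hmem (by simpa using h1)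
      have hqk : q.1 ∈ rowd.keys := by
        rw [hpe] at hq
        simpa [PySem.Dict.keys] using List.mem_map_of_mem (f := Prod.fst) hq
      have hnr : p.1 ∉ rows := h1 ▸ (List.nodup_cons.1 hndr).1
      simp [h1, hnr, hqk]
    · by_cases h2 : p.1 ∈ rows <;>
        simp [h1, h2]

lemma fold_cols_mod (M : PySem.Dict Int (PySem.Dict Int (List String)))
    (hnd1 : M.keys.Nodup) (hnd2 : ∀ p ∈ M.items, p.2.keys.Nodup)
    (h : List String → List String) (row : Int) (rowd : PySem.Dict Int (List String))
    (hrow : M.get? row = some rowd) :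
    ∀ (cols : List Int) (g : Int → Int → List String → List String),
      cols.Nodup → (∀ c ∈ cols, c ∈ rowd.keys) →
      cols.foldl (fun mz col =>
          mz.modify row PySem.Dict.empty (fun ρ => ρ.modify col [] h)) (mapCells M g)
        = mapCells M (fun r c v => if r = row ∧ c ∈ cols then h (g r c v) else g r c v) := by
  intro cols
  induction cols with
  | nil =>
    intro g hndc hsub
    simp only [List.foldl_nil]
    apply mapCells_congr
    intro p hp q hq
    simp
  | cons col cols ih =>
    intro g hndc hsub
    rw [List.foldl_cons,
      mapCells_modify2 M g row col rowd hrow (hsub col (by simp)) hnd1 hnd2 h]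
    have ih' := ih (fun r c v => if r = row ∧ c = col then h (g r c v) else g r c v)
      (by simpa using (List.nodup_cons.1 hndc).2)
      (fun c hc => hsub c (by simp [hc]))
    refine Eq.trans ih' ?_
    apply mapCells_congr
    intro p hp q hq
    by_cases h1 : p.1 = row ∧ q.1 = col
    · obtain ⟨e1, e2⟩ := h1
      have hnc : col ∉ cols := (List.nodup_cons.1 hndc).1
      simp [e1, e2, hnc]
    · by_cases h2 : p.1 = row ∧ q.1 ∈ cols
      · have hne : q.1 ≠ col := fun he => h1 ⟨h2.1, he⟩
        simp [h2.1, h2.2, hne]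
      · have h3 : ¬(p.1 = row ∧ q.1 ∈ col :: cols) := by
          rintro ⟨hr, hcmem⟩
          rcases List.mem_cons.1 hcmem with hc | hc
          · exact h1 ⟨hr, hc⟩
          · exact h2 ⟨hr, hc⟩
        simp only [if_neg h1, if_neg h2, if_neg h3]

lemma fold_rows_mod (M : PySem.Dict Int (PySem.Dict Int (List String)))
    (hnd1 : M.keys.Nodup) (hnd2 : ∀ p ∈ M.items, p.2.keys.Nodup)
    (h : List String → List String) :
    ∀ (rows : List Int) (g : Int → Int → List String → List String),
      rows.Nodup → (∀ r ∈ rows, r ∈ M.keys) →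
      rows.foldl (fun mz row =>
          ((mz.getD row PySem.Dict.empty).keys).foldl (fun mz col =>
            mz.modify row PySem.Dict.empty (fun ρ => ρ.modify col [] h)) mz)
        (mapCells M g)
        = mapCells M (fun r c v => if r ∈ rows then h (g r c v) else g r c v) := by
  intro rows
  induction rows with
  | nil =>
    intro g hndr hsub
    simp only [List.foldl_nil]
    apply mapCells_congr
    intro p hp q hq
    simp
  | cons row rows ih =>
    intro g hndr hsub
    obtain ⟨rowd, hrow⟩ := mem_keys_get? M (hsub row (by simp))
    have hmem : (row, rowd) ∈ M.items := PySem.Dict.mem_items_of_get?_eq_some M hrow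
    rw [List.foldl_cons, keys_getD_mapCells M g hrow,
      fold_cols_mod M hnd1 hnd2 h row rowd hrow rowd.keys g (hnd2 _ hmem) (fun c hc => hc)]
    have ih' := ih (fun r c v => if r = row ∧ c ∈ rowd.keys then h (g r c v) else g r c v)
      (by simpa using (List.nodup_cons.1 hndr).2)
      (fun r hr => hsub r (by simp [hr]))
    refine Eq.trans ih' ?_
    apply mapCells_congr
    intro p hp q hq
    by_cases h1 : p.1 = row
    · have hpe : p = (row, rowd) :=
        pvKeyUnique M.items (by simpa [PySem.Dict.keys] using hnd1) hp hmem (by simpa using h1)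
      have hqk : q.1 ∈ rowd.keys := by
        rw [hpe] at hq
        simpa [PySem.Dict.keys] using List.mem_map_of_mem (f := Prod.fst) hq
      have hnr : row ∉ rows := (List.nodup_cons.1 hndr).1
      simp [h1, hnr, hqk]
    · by_cases h2 : p.1 ∈ rows <;>
        simp [h1, h2]

lemma pass1_eq (O : PySem.Dict Int (PySem.Dict Int (List String)))
    (hnd1 : O.keys.Nodup) (hnd2 : ∀ p ∈ O.items, p.2.keys.Nodup) :
    pvPass1 O = mapCells O (fun r c v => v ++ addB O r c) := by
  have key := fold_rows_cstep O hnd1 hnd2 O.keys (fun _ _ => [])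
    (by intro r c s h; simp at h) hnd1 (fun r hr => hr) (fun r _ c => rfl)
  have hO : mapCells O (fun r c v => v ++ (fun (_ _ : Int) => ([] : List String)) r c) = O := by
    refine Eq.trans ?_ (mapCells_id O)
    apply mapCells_congr
    intro p hp q hq
    simp
  rw [hO] at key
  unfold pvPass1
  refine Eq.trans key ?_
  apply mapCells_congr
  intro p hp q hq
  have : p.1 ∈ O.keys := by
    simpa [PySem.Dict.keys] using List.mem_map_of_mem (f := Prod.fst) hp
  simp [this]

lemma pass2_eq (M : PySem.Dict Int (PySem.Dict Int (List String)))
    (hnd1 : M.keys.Nodup) (hnd2 : ∀ p ∈ M.items, p.2.keys.Nodup) :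
    pvPass2 M = mapCells M (fun _ _ v =>
      if "E" ∈ v then (PySem.List.remove? v "E").getD v else v) := by
  have key := fold_rows_mod M hnd1 hnd2
    (fun c => if "E" ∈ c then (PySem.List.remove? c "E").getD c else c)
    M.keys (fun _ _ v => v) hnd1 (fun r hr => hr)
  rw [mapCells_id] at key
  unfold pvPass2
  refine Eq.trans key ?_
  apply mapCells_congr
  intro p hp q hq
  have : p.1 ∈ M.keys := by
    simpa [PySem.Dict.keys] using List.mem_map_of_mem (f := Prod.fst) hp
  simp [this]

-- ===== B-side lemmas: characterising the offers index =====

-- normal form of one push step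
def pvPushTarget (O : PySem.Dict Int (PySem.Dict Int (List String)))
    (t : Int × Int × String) : Option ((Int × Int) × String) :=
  match pvDelta.get? t.2.2 with
  | none => none
  | some dxy =>
    let nr := t.1 + dxy.2
    let nc := t.2.1 + dxy.1
    match O.get? nr with
    | none => none
    | some nbRow => if nbRow.contains nc then some ((nr, nc), pvOpp t.2.2) else none

lemma pushStep_cases (O : PySem.Dict Int (PySem.Dict Int (List String))) (r c : Int)
    (P : PySem.Dict (Int × Int) (PySem.Set String)) (s : String) :
    pvPushStep O r c P s
      = (match pvPushTarget O (r, c, s) with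
         | none => P
         | some kd => P.modify kd.1 PySem.Set.empty (fun st => st.add kd.2)) := by
  unfold pvPushStep pvPushTarget
  rcases h1 : pvDelta.get? s with _ | dxy
  · rfl
  · dsimp only
    rcases h2 : O.get? (r + dxy.2) with _ | nbRow
    · rfl
    · dsimp only
      by_cases h3 : nbRow.contains (c + dxy.1) = true <;> simp [h3]

def pvTriples (O : PySem.Dict Int (PySem.Dict Int (List String))) : List (Int × Int × String) :=
  O.items.flatMap (fun p => p.2.items.flatMap (fun q => q.2.map (fun s => (p.1, q.1, s))))

lemma pvFoldlFlatMap {α β σ : Type} (l : List α) (g : α → List β) (f : σ → β → σ) (init : σ) :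
    (l.flatMap g).foldl f init = l.foldl (fun s a => (g a).foldl f s) init := by
  induction l generalizing init with
  | nil => rfl
  | cons a l ih => simp [List.flatMap_cons, List.foldl_append, ih]

lemma offers_eq_foldl (O : PySem.Dict Int (PySem.Dict Int (List String))) :
    pvOffers O = (pvTriples O).foldl
      (fun P t => pvPushStep O t.1 t.2.1 P t.2.2) PySem.Dict.empty := by
  unfold pvOffers pvTriples
  rw [pvFoldlFlatMap]
  apply List.foldl_ext
  intro P p _
  rw [pvFoldlFlatMap]
  apply List.foldl_ext
  intro P' q _
  rw [List.foldl_map]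

lemma mem_offers_foldl (O : PySem.Dict Int (PySem.Dict Int (List String))) :
    ∀ (ts : List (Int × Int × String)) (P0 : PySem.Dict (Int × Int) (PySem.Set String))
      (key : Int × Int) (x : String),
      (x ∈ (ts.foldl (fun P t => pvPushStep O t.1 t.2.1 P t.2.2) P0).getD key PySem.Set.empty)
        ↔ x ∈ P0.getD key PySem.Set.empty ∨ ∃ t ∈ ts, pvPushTarget O t = some (key, x) := by
  intro ts
  induction ts with
  | nil => intro P0 key x; simp
  | cons t ts ih =>
    intro P0 key x
    rw [List.foldl_cons, ih]
    have hstep := pushStep_cases O t.1 t.2.1 P0 t.2.2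
    rcases h1 : pvPushTarget O (t.1, t.2.1, t.2.2) with _ | kd
    · rw [hstep, h1]
      constructor
      · rintro (h | ⟨t', ht', he⟩)
        · exact Or.inl h
        · exact Or.inr ⟨t', List.mem_cons_of_mem t ht', he⟩
      · rintro (h | ⟨t', ht', he⟩)
        · exact Or.inl h
        · rcases List.mem_cons.1 ht' with rfl | ht''
          · rw [show (t'.1, t'.2.1, t'.2.2) = t' from rfl] at h1
            rw [h1] at he; cases he
          · exact Or.inr ⟨t', ht'', he⟩
    · rw [hstep, h1]
      dsimp only
      rw [PySem.Dict.getD_modify]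
      constructor
      · rintro (h | ⟨t', ht', he⟩)
        · by_cases hk : key = kd.1
          · rw [if_pos hk] at h
            rcases (PySem.Set.mem_add _ _ _).1 h with h' | h'
            · exact Or.inl (hk ▸ h')
            · subst h'
              refine Or.inr ⟨t, by simp, ?_⟩
              rw [show (t.1, t.2.1, t.2.2) = t from rfl] at h1
              rw [h1, hk]
          · rw [if_neg hk] at h
            exact Or.inl h
        · exact Or.inr ⟨t', List.mem_cons_of_mem t ht', he⟩
      · rintro (h | ⟨t', ht', he⟩)
        · by_cases hk : key = kd.1
          · rw [if_pos hk]
            exact Or.inl ((PySem.Set.mem_add _ _ _).2 (Or.inl (hk ▸ h)))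
          · rw [if_neg hk]
            exact Or.inl h
        · rcases List.mem_cons.1 ht' with rfl | ht''
          · rw [show (t'.1, t'.2.1, t'.2.2) = t' from rfl] at h1
            rw [h1] at he
            have hke : kd = (key, x) := Option.some.inj he
            rw [if_pos (by rw [hke])]
            exact Or.inl ((PySem.Set.mem_add _ _ _).2 (Or.inr (by rw [hke])))
          · exact Or.inr ⟨t', ht'', he⟩

lemma mem_triples (O : PySem.Dict Int (PySem.Dict Int (List String)))
    (hnd1 : O.keys.Nodup) (hnd2 : ∀ p ∈ O.items, p.2.keys.Nodup)
    (R C : Int) (s : String) :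
    (R, C, s) ∈ pvTriples O
      ↔ ∃ rowd cv, O.get? R = some rowd ∧ rowd.get? C = some cv ∧ s ∈ cv := by
  unfold pvTriples
  simp only [List.mem_flatMap, List.mem_map]
  constructor
  · rintro ⟨p, hp, q, hq, s', hs', he⟩
    obtain ⟨e1, e2, e3⟩ : p.1 = R ∧ q.1 = C ∧ s' = s := by
      injection he with h1 h2; injection h2 with h2 h3; exact ⟨h1, h2, h3⟩
    refine ⟨p.2, q.2, ?_, ?_, e3 ▸ hs'⟩
    · rw [← e1]; exact PySem.Dict.get?_of_mem_items O (by simpa using hp) hnd1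
    · rw [← e2]; exact PySem.Dict.get?_of_mem_items p.2 (by simpa using hq) (hnd2 p hp)
  · rintro ⟨rowd, cv, hrow, hcv, hs⟩
    exact ⟨(R, rowd), PySem.Dict.mem_items_of_get?_eq_some O hrow,
      (C, cv), PySem.Dict.mem_items_of_get?_eq_some rowd hcv, s, hs, rfl⟩

lemma pvDeltaMem : ∀ (s : String) (dxy : Int × Int),
    pvDelta.get? s = some dxy → (s, dxy.1, dxy.2) ∈ pvDirs := by
  intro s dxy h
  have hkeys : s ∈ pvDelta.keys := by
    by_contra hc
    rw [(PySem.Dict.get?_eq_none_iff_not_mem_keys _ _).2 hc] at h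
    cases h
  have : s = "L" ∨ s = "R" ∨ s = "U" ∨ s = "D" := by
    simpa [pvDelta, PySem.Dict.keys] using hkeys
  rcases this with rfl | rfl | rfl | rfl
  · rw [show pvDelta.get? "L" = some ((-1 : Int), (0 : Int)) from by decide] at h
    obtain rfl := (Option.some.inj h).symm; decide
  · rw [show pvDelta.get? "R" = some ((1 : Int), (0 : Int)) from by decide] at h
    obtain rfl := (Option.some.inj h).symm; decide
  · rw [show pvDelta.get? "U" = some ((0 : Int), (-1 : Int)) from by decide] at h
    obtain rfl := (Option.some.inj h).symm; decide
  · rw [show pvDelta.get? "D" = some ((0 : Int), (1 : Int)) from by decide] at h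
    obtain rfl := (Option.some.inj h).symm; decide

lemma pvDirsOppEx : ∀ d ∈ pvDirs, ∃ d' ∈ pvDirs, d'.1 = pvOpp d.1 ∧
    d'.2.1 = -d.2.1 ∧ d'.2.2 = -d.2.2 ∧ pvOpp d'.1 = d.1 := by decide

lemma pvDeltaOfDirs : ∀ d ∈ pvDirs, pvDelta.get? d.1 = some (d.2.1, d.2.2) := by decide

lemma pvDirsFstInj : ∀ d ∈ pvDirs, ∀ d' ∈ pvDirs, d.1 = d'.1 → d = d' := by decide

-- membership in the offers of an EXISTING cell ↔ the pull condition on O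
lemma mem_offers (O : PySem.Dict Int (PySem.Dict Int (List String)))
    (hnd1 : O.keys.Nodup) (hnd2 : ∀ p ∈ O.items, p.2.keys.Nodup)
    (r c : Int) (rowd : PySem.Dict Int (List String)) (cv : List String)
    (hrow : O.get? r = some rowd) (hcv : rowd.get? c = some cv) (x : String) :
    x ∈ (pvOffers O).getD (r, c) PySem.Set.empty
      ↔ ∃ d ∈ pvDirs, d.1 = x ∧ (cellO? O (r + d.2.2) (c + d.2.1)).isSome = true
          ∧ pvOpp d.1 ∈ cellO O (r + d.2.2) (c + d.2.1) := by
  rw [offers_eq_foldl, mem_offers_foldl]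
  simp only [PySem.Dict.getD_empty]
  constructor
  · rintro (h | ⟨t, ht, he⟩)
    · simp [PySem.Set.empty] at h
    · obtain ⟨R, C, s⟩ := t
      -- unfold the push target
      unfold pvPushTarget at he
      dsimp only at he
      rcases h1 : pvDelta.get? s with _ | dxy
      · rw [h1] at he; cases he
      · rw [h1] at he
        dsimp only at he
        rcases h2 : O.get? (R + dxy.2) with _ | nbRow
        · rw [h2] at he; cases he
        · rw [h2] at he
          dsimp only at he
          by_cases h3 : nbRow.contains (C + dxy.1) = true
          · rw [if_pos h3] at he
            injection he with he1
            have heR : R + dxy.2 = r := congrArg (fun z => z.1.1) he1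
            have heC : C + dxy.1 = c := congrArg (fun z => z.1.2) he1
            have he2 : pvOpp s = x := congrArg (fun z => z.2) he1
            -- s is a direction letter; pick its opposite d'
            have hsd : (s, dxy.1, dxy.2) ∈ pvDirs := pvDeltaMem s dxy h1
            obtain ⟨d', hd', hfst, hdx, hdy, hopp⟩ := pvDirsOppEx (s, dxy.1, dxy.2) hsd
            refine ⟨d', hd', by rw [hfst, he2], ?_, ?_⟩
            · -- neighbour of (r,c) along d' is (R,C), an existing cell containing s
              have hR : r + d'.2.2 = R := by
                rw [← heR]; dsimp only at hdy ⊢; omega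
              have hC : c + d'.2.1 = C := by
                rw [← heC]; dsimp only at hdx ⊢; omega
              obtain ⟨rowd', cv', hrow', hcv', hs'⟩ :=
                (mem_triples O hnd1 hnd2 R C s).1 ht
              rw [hR, hC]
              simp [cellO?, hrow', hcv']
            · have hR : r + d'.2.2 = R := by
                rw [← heR]; dsimp only at hdy ⊢; omega
              have hC : c + d'.2.1 = C := by
                rw [← heC]; dsimp only at hdx ⊢; omega
              obtain ⟨rowd', cv', hrow', hcv', hs'⟩ :=
                (mem_triples O hnd1 hnd2 R C s).1 ht
              rw [hR, hC, hopp, cellO_eq O hrow' hcv']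
              exact hs'
          · rw [if_neg h3] at he; cases he
  · rintro ⟨d, hd, hfst, hsome, hmem⟩
    -- the neighbour cell exists: name it
    rcases h1 : cellO? O (r + d.2.2) (c + d.2.1) with _ | nbv
    · rw [h1] at hsome; cases hsome
    · have hnb : cellO O (r + d.2.2) (c + d.2.1) = nbv := by simp [cellO, h1]
      obtain ⟨rowd', hrow', hcv'⟩ :
          ∃ rowd', O.get? (r + d.2.2) = some rowd' ∧ rowd'.get? (c + d.2.1) = some nbv := by
        unfold cellO? at h1
        rcases h2 : O.get? (r + d.2.2) with _ | rowd'
        · rw [h2] at h1; cases h1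
        · rw [h2] at h1; exact ⟨rowd', rfl, by simpa using h1⟩
      -- the triple that pushes x to (r, c)
      obtain ⟨d', hd', hfst', hdx, hdy, hopp⟩ := pvDirsOppEx d hd
      refine Or.inr ⟨(r + d.2.2, c + d.2.1, pvOpp d.1),
        (mem_triples O hnd1 hnd2 _ _ _).2 ⟨rowd', nbv, hrow', hcv', hnb ▸ hmem⟩, ?_⟩
      unfold pvPushTarget
      dsimp only
      have hdel : pvDelta.get? (pvOpp d.1) = some (d'.2.1, d'.2.2) := by
        rw [← hfst']; exact pvDeltaOfDirs d' hd'
      rw [hdel]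
      dsimp only
      have hR : r + d.2.2 + d'.2.2 = r := by omega
      have hC : c + d.2.1 + d'.2.1 = c := by omega
      rw [hR, hC, hrow]
      dsimp only
      have hcont : rowd.contains c = true := by
        rw [PySem.Dict.contains_eq_isSome_get?, hcv]; rfl
      rw [if_pos hcont, ← hfst', hopp, hfst]

-- the appended list B builds equals A's addB
lemma rebuild_filter_eq (O : PySem.Dict Int (PySem.Dict Int (List String)))
    (hnd1 : O.keys.Nodup) (hnd2 : ∀ p ∈ O.items, p.2.keys.Nodup)
    (r c : Int) (rowd : PySem.Dict Int (List String)) (cv : List String)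
    (hrow : O.get? r = some rowd) (hcv : rowd.get? c = some cv) :
    pvOrder.filter (fun d =>
        PySem.Set.contains ((pvOffers O).getD (r, c) PySem.Set.empty) d && decide (d ∉ cv))
      = addB O r c := by
  have hcell : cellO O r c = cv := cellO_eq O hrow hcv
  have hpt : ∀ d ∈ pvDirs,
      (PySem.Set.contains ((pvOffers O).getD (r, c) PySem.Set.empty) d.1 && decide (d.1 ∉ cv))
        = qualB O r c d := by
    intro d hd
    have hmemiff : d.1 ∈ (pvOffers O).getD (r, c) PySem.Set.empty
        ↔ ((cellO? O (r + d.2.2) (c + d.2.1)).isSome = true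
            ∧ pvOpp d.1 ∈ cellO O (r + d.2.2) (c + d.2.1)) := by
      rw [mem_offers O hnd1 hnd2 r c rowd cv hrow hcv d.1]
      constructor
      · rintro ⟨d', hd', hfst, h1, h2⟩
        have : d' = d := pvDirsFstInj d' hd' d hd hfst
        subst this
        exact ⟨h1, h2⟩
      · intro h
        exact ⟨d, hd, rfl, h.1, h.2⟩
    simp only [PySem.Set.empty] at hmemiff
    have hcb : PySem.Set.contains ((pvOffers O).getD (r, c) PySem.Set.empty) d.1
        = decide (d.1 ∈ (pvOffers O).getD (r, c) PySem.Set.empty) := by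
      by_cases hm : d.1 ∈ (pvOffers O).getD (r, c) PySem.Set.empty
      · rw [(PySem.Set.contains_iff _ _).2 hm, decide_eq_true hm]
      · rw [decide_eq_false hm]
        cases he : PySem.Set.contains ((pvOffers O).getD (r, c) PySem.Set.empty) d.1
        · rfl
        · exact absurd ((PySem.Set.contains_iff _ _).1 he) hm
    rw [hcb]
    unfold qualB
    rw [hcell]
    by_cases h1 : (cellO? O (r + d.2.2) (c + d.2.1)).isSome = true <;>
      by_cases h2 : pvOpp d.1 ∈ cellO O (r + d.2.2) (c + d.2.1) <;>
        by_cases h3 : d.1 ∈ cv <;>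
          simp [h1, h2, h3, hmemiff]
  rw [show pvOrder = pvDirs.map Prod.fst from rfl, List.filter_map, addB]
  congr 1
  apply List.filter_congr
  intro d hd
  exact hpt d hd

lemma E_not_mem_addB (O : PySem.Dict Int (PySem.Dict Int (List String))) (r c : Int) :
    "E" ∉ addB O r c := by
  intro h
  simp only [addB, List.mem_map, List.mem_filter] at h
  obtain ⟨d, ⟨hd, -⟩, hfst⟩ := h
  have : ∀ d ∈ pvDirs, d.1 ≠ "E" := by decide
  exact this d hd hfst

lemma remove?_append_left (xs ys : List String) (h : "E" ∈ xs) :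
    PySem.List.remove? (xs ++ ys) "E" = (PySem.List.remove? xs "E").map (· ++ ys) := by
  induction xs with
  | nil => simp at h
  | cons a xs ih =>
    by_cases ha : a = "E"
    · subst ha
      simp [PySem.List.remove?_cons_self]
    · have hx : "E" ∈ xs := by
        rcases List.mem_cons.1 h with h' | h'
        · exact absurd h'.symm ha
        · exact h'
      rw [List.cons_append, PySem.List.remove?_cons_of_ne (xs ++ ys) ha,
        PySem.List.remove?_cons_of_ne xs ha, ih hx, Option.map_map, Option.map_map]
      rfl

-- B's rebuilt cell equals A's final cell value
lemma rebuild_eq (O : PySem.Dict Int (PySem.Dict Int (List String)))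
    (hnd1 : O.keys.Nodup) (hnd2 : ∀ p ∈ O.items, p.2.keys.Nodup)
    (r c : Int) (rowd : PySem.Dict Int (List String)) (cv : List String)
    (hrow : O.get? r = some rowd) (hcv : rowd.get? c = some cv) :
    pvRebuildCell (pvOffers O) r c cv
      = (if "E" ∈ cv ++ addB O r c
          then (PySem.List.remove? (cv ++ addB O r c) "E").getD (cv ++ addB O r c)
          else cv ++ addB O r c) := by
  unfold pvRebuildCell
  dsimp only
  rw [rebuild_filter_eq O hnd1 hnd2 r c rowd cv hrow hcv]
  by_cases hE : "E" ∈ cv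
  · rw [if_pos hE, if_pos (List.mem_append_left _ hE),
      remove?_append_left cv (addB O r c) hE]
    rcases hrem : PySem.List.remove? cv "E" with _ | l
    · rw [PySem.List.remove?_eq_none_iff] at hrem
      exact absurd hE hrem
    · simp [hrem]
  · have hE2 : "E" ∉ cv ++ addB O r c := by
      intro hc
      rcases List.mem_append.1 hc with h | h
      · exact hE h
      · exact E_not_mem_addB O r c h
    rw [if_neg hE, if_neg hE2]

lemma alt_eq (maze : List (Int × List (Int × List String)))
    (hnd1 : (pvToD maze).keys.Nodup)
    (hnd2 : ∀ p ∈ (pvToD maze).items, p.2.keys.Nodup) :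
    fix_directions_alt maze
      = pvFromD (mapCells (pvToD maze)
          (fun r c v => pvRebuildCell (pvOffers (pvToD maze)) r c v)) := by
  unfold fix_directions_alt
  dsimp only
  congr 1
  apply PySem.Dict.ext
  rw [PySem.Dict.items_foldl_insert_fresh (pvToD maze).items (fun p => p.1)
      (fun p => p.2.items.foldl (fun nr q =>
        nr.insert q.1 (pvRebuildCell (pvOffers (pvToD maze)) p.1 q.1 q.2)) PySem.Dict.empty)
      PySem.Dict.empty (fun a _ => by simp [PySem.Dict.contains_empty])
      (by simpa [PySem.Dict.keys] using hnd1)]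
  show _ = ((pvToD maze).items.map (fun p =>
    (p.1, PySem.Dict.mk (p.2.items.map
      (fun q => (q.1, pvRebuildCell (pvOffers (pvToD maze)) p.1 q.1 q.2))))))
  rw [show (PySem.Dict.empty : PySem.Dict Int (PySem.Dict Int (List String))).items = [] from rfl,
    List.nil_append]
  apply List.map_congr_left
  intro p hp
  congr 1
  apply PySem.Dict.ext
  rw [PySem.Dict.items_foldl_insert_fresh p.2.items (fun q => q.1)
      (fun q => pvRebuildCell (pvOffers (pvToD maze)) p.1 q.1 q.2)
      PySem.Dict.empty (fun a _ => by simp [PySem.Dict.contains_empty])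
      (by simpa [PySem.Dict.keys] using hnd2 p hp)]
  rfl

theorem pvMainEq :
    ∀ (maze : List (Int × List (Int × List String))),
      ((maze.map Prod.fst).Nodup ∧ ∀ p ∈ maze, (p.2.map Prod.fst).Nodup) →
      fix_directions maze = fix_directions_alt maze := by
  intro maze hpre
  obtain ⟨hp1, hp2⟩ := hpre
  have hnd1 : (pvToD maze).keys.Nodup := by
    have hk : (pvToD maze).keys = maze.map Prod.fst := by
      simp [pvToD, PySem.Dict.keys, List.map_map]
    rw [hk]; exact hp1
  have hnd2 : ∀ p ∈ (pvToD maze).items, p.2.keys.Nodup := by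
    intro p hp
    have hp' : p ∈ maze.map (fun p => (p.1, PySem.Dict.mk p.2)) := hp
    obtain ⟨a, ha, rfl⟩ := List.mem_map.1 hp'
    simpa [PySem.Dict.keys] using hp2 a ha
  have hM1 : (mapCells (pvToD maze) (fun r c v => v ++ addB (pvToD maze) r c)).keys.Nodup := by
    rw [mapCells_keys]; exact hnd1
  have hM2 : ∀ p ∈ (mapCells (pvToD maze) (fun r c v => v ++ addB (pvToD maze) r c)).items,
      p.2.keys.Nodup := by
    intro p hp
    have hp' : p ∈ (pvToD maze).items.map (fun p => (p.1, PySem.Dict.mk (p.2.items.map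
        (fun q => (q.1, q.2 ++ addB (pvToD maze) p.1 q.1))))) := hp
    obtain ⟨a, ha, rfl⟩ := List.mem_map.1 hp'
    have := hnd2 a ha
    simpa [PySem.Dict.keys, List.map_map] using this
  calc fix_directions maze
      = pvFromD (pvPass2 (pvPass1 (pvToD maze))) := rfl
    _ = pvFromD (pvPass2 (mapCells (pvToD maze)
          (fun r c v => v ++ addB (pvToD maze) r c))) := by
        rw [pass1_eq _ hnd1 hnd2]
    _ = pvFromD (mapCells (mapCells (pvToD maze)
          (fun r c v => v ++ addB (pvToD maze) r c))
          (fun _ _ v => if "E" ∈ v then (PySem.List.remove? v "E").getD v else v)) := by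
        rw [pass2_eq _ hM1 hM2]
    _ = pvFromD (mapCells (pvToD maze)
          (fun r c v => pvRebuildCell (pvOffers (pvToD maze)) r c v)) := by
        rw [mapCells_mapCells]
        congr 1
        apply mapCells_congr
        intro p hp q hq
        have hrow : (pvToD maze).get? p.1 = some p.2 :=
          PySem.Dict.get?_of_mem_items _ (by simpa using hp) hnd1
        have hcv : p.2.get? q.1 = some q.2 :=
          PySem.Dict.get?_of_mem_items _ (by simpa using hq) (hnd2 p hp)
        exact (rebuild_eq (pvToD maze) hnd1 hnd2 p.1 q.1 p.2 q.2 hrow hcv).symm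
    _ = fix_directions_alt maze := (alt_eq maze hnd1 hnd2).symm

-- ===== VERDICT (by name: the statement is the Claim_ definition above) =====
theorem fix_directions_spec : Claim_equal_fix_directions := by
  intro maze _ hpre
  unfold Spec_fix_directions
  exact pvMainEq maze hpre
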